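-- pv_equiv track=rewrite | github.com/amol179/DSA_Notes_Dump | Code_Force/1000/Red and Blue/red and blue.py | solve
-- ===== SOURCE A (Python) =====
-- def max_prefix_sum(arr):
--     max_sum = 0
--     current_sum = 0
--     for num in arr:
--         current_sum += num
--         if current_sum > max_sum:
--             max_sum = current_sum
--     return max_sum
--
-- def solve(test_cases):
--     results = []
--     for case in test_cases:
--         n, reds, m, blues = case
--         max_r = max_prefix_sum(reds)
--         max_b = max_prefix_sum(blues)
--         results.append(max_r + max_b)
--     return results
-- ===== SOURCE B (Python) =====
-- def _scan(arr):
--     # returns (total sum, max(0, max prefix sum)) by divide and conquer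
--     if not arr:
--         return (0, 0)
--     if len(arr) == 1:
--         x = arr[0]
--         return (x, max(0, x))
--     mid = len(arr) // 2
--     sL, mL = _scan(arr[:mid])
--     sR, mR = _scan(arr[mid:])
--     return (sL + sR, max(mL, sL + mR))
--
-- def solve(test_cases):
--     return [_scan(reds)[1] + _scan(blues)[1]
--             for _n, reds, _m, blues in test_cases]
-- ===== Notes on version B (the rewrite author's own statement) =====
-- stated objective: alternative
-- what changed: max_prefix_sum is recomputed by a divide-and-conquer recursion on array halves that returns (total sum, clamped max prefix) pairs combined as max(mL, sL+mR), instead of A's single left-to-right running-max loop.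
import Mathlib
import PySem

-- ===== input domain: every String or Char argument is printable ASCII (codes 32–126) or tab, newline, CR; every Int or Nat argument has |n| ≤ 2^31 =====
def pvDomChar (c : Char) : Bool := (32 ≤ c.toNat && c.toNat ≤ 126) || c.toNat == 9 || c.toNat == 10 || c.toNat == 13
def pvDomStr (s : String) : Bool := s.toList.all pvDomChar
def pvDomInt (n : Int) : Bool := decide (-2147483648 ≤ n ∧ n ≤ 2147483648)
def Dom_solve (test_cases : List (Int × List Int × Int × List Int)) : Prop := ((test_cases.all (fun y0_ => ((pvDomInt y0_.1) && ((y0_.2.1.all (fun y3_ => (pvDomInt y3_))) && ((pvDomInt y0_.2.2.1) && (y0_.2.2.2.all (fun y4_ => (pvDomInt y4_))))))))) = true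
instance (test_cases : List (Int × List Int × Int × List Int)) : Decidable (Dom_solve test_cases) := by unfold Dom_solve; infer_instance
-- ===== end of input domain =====

-- B replaces A's single left-to-right running-max loop by a divide-and-conquer recursion on
-- array halves returning (sum, clamped max prefix) pairs; objective: alternative, same cost.
-- ===== PORT A =====
-- A: one fused loop keeping (max_sum, current_sum)
def maxPrefixSum (arr : List Int) : Int :=
  (arr.foldl (fun (st : Int × Int) num =>
      let c := st.2 + num
      (if c > st.1 then c else st.1, c)) (0, 0)).1

def solve (test_cases : List (Int × List Int × Int × List Int)) : List Int :=
  test_cases.foldl (fun results case =>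
    results ++ [maxPrefixSum case.2.1 + maxPrefixSum case.2.2.2]) []

-- ===== PORT B =====
-- B: divide and conquer; returns (total sum, max(0, max prefix sum))
def scanDC (arr : List Int) : Int × Int :=
  match arr with
  | [] => (0, 0)
  | [x] => (x, max 0 x)
  | a :: b :: rest =>
    let mid := (a :: b :: rest).length / 2
    let L := scanDC ((a :: b :: rest).take mid)
    let R := scanDC ((a :: b :: rest).drop mid)
    (L.1 + R.1, max L.2 (L.1 + R.2))
termination_by arr.length
decreasing_by
  · simp [List.length_take]; omega
  · simp [List.length_drop]; omega

def solve_alt (test_cases : List (Int × List Int × Int × List Int)) : List Int :=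
  test_cases.map (fun case => (scanDC case.2.1).2 + (scanDC case.2.2.2).2)

-- ===== PRECONDITION & SPEC =====
def Spec_solve (test_cases : List (Int × List Int × Int × List Int)) (out : List Int) : Prop := out = solve_alt test_cases
instance (test_cases : List (Int × List Int × Int × List Int)) (out : List Int) : Decidable (Spec_solve test_cases out) := by unfold Spec_solve; infer_instance

-- ===== CLAIM (what is proved, stated in full; the proofs are below) =====
def Claim_equal_solve : Prop := ∀ (test_cases : List (Int × List Int × Int × List Int)), Dom_solve test_cases → Spec_solve test_cases (solve test_cases)

-- ===== LEMMAS AND PROOFS =====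

-- max of 0 and every prefix sum, structurally
def bestPref : List Int → Int
  | [] => 0
  | x :: xs => max 0 (x + bestPref xs)

theorem bestPref_nonneg (arr : List Int) : 0 ≤ bestPref arr := by
  cases arr with
  | nil => simp [bestPref]
  | cons x xs => simp [bestPref]

theorem foldA_eq (arr : List Int) : ∀ (m c : Int), c ≤ m →
    (arr.foldl (fun (st : Int × Int) num =>
      let c := st.2 + num
      (if c > st.1 then c else st.1, c)) (m, c)).1 = max m (c + bestPref arr) := by
  induction arr with
  | nil => intro m c h; simp [bestPref]; omega
  | cons x xs ih =>
    intro m c h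
    simp only [List.foldl_cons, bestPref]
    have hb := bestPref_nonneg xs
    split_ifs with hlt
    · rw [ih (c + x) (c + x) le_rfl]; omega
    · rw [ih m (c + x) (by omega)]; omega

theorem maxPrefixSum_eq (arr : List Int) : maxPrefixSum arr = bestPref arr := by
  have h := foldA_eq arr 0 0 le_rfl
  have hb := bestPref_nonneg arr
  unfold maxPrefixSum
  rw [h]
  omega

theorem bestPref_append (l r : List Int) :
    bestPref (l ++ r) = max (bestPref l) (l.sum + bestPref r) := by
  induction l with
  | nil => have := bestPref_nonneg r; simp [bestPref]; omega
  | cons x xs ih =>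
    simp only [List.cons_append, bestPref, List.sum_cons, ih]
    omega

theorem scanDC_eq (arr : List Int) : scanDC arr = (arr.sum, bestPref arr) := by
  induction arr using scanDC.induct with
  | case1 => simp [scanDC, bestPref]
  | case2 x => simp [scanDC, bestPref]
  | case3 a b rest mid ihL ihR =>
    rw [scanDC]
    rw [ihL, ihR]
    have hsplit : (a :: b :: rest).take mid ++ (a :: b :: rest).drop mid = a :: b :: rest :=
      List.take_append_drop _ _
    simp only [Prod.mk.injEq]
    refine ⟨?_, ?_⟩
    · conv_rhs => rw [← hsplit]
      simp
    · conv_rhs => rw [← hsplit]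
      rw [bestPref_append]

theorem foldl_append_map (f : (Int × List Int × Int × List Int) → Int)
    (l : List (Int × List Int × Int × List Int)) : ∀ (acc : List Int),
    l.foldl (fun r c => r ++ [f c]) acc = acc ++ l.map f := by
  induction l with
  | nil => intro acc; simp
  | cons x xs ih => intro acc; simp [ih]

-- ===== VERDICT (by name: the statement is the Claim_ definition above) =====
theorem solve_spec : Claim_equal_solve := by
  intro tcs _
  unfold Spec_solve solve solve_alt
  rw [foldl_append_map (fun case => maxPrefixSum case.2.1 + maxPrefixSum case.2.2.2) tcs []]
  simp [maxPrefixSum_eq, scanDC_eq]
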